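-- pv_equiv track=rewrite | github.com/pharesim/propolis-wiki | wiki/wiki.py | unformatPostLink
-- ===== SOURCE A (Python) =====
-- def unformatPostLink(hive_post):
--     split = hive_post.split("-")
--     hive_post = ''
--     for i, val in enumerate(split):
--         hive_post += val[:1].lower()+val[1:]
--         if(i+1 < len(split)):
--             hive_post += '-'
--     return hive_post
-- ===== SOURCE B (Python) =====
-- def unformatPostLink(hive_post):
--     out = []
--     at_start = True
--     for c in hive_post:
--         out.append(c.lower() if at_start else c)
--         at_start = (c == '-')
--     return ''.join(out)
-- ===== Notes on version B (the rewrite author's own statement) =====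
-- stated objective: alternative
-- what changed: Replaces the split/enumerate/rejoin pipeline with a single character-by-character scan that lowercases a character exactly when it opens a hyphen-delimited segment, tracked by a boolean flag.
import Mathlib
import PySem

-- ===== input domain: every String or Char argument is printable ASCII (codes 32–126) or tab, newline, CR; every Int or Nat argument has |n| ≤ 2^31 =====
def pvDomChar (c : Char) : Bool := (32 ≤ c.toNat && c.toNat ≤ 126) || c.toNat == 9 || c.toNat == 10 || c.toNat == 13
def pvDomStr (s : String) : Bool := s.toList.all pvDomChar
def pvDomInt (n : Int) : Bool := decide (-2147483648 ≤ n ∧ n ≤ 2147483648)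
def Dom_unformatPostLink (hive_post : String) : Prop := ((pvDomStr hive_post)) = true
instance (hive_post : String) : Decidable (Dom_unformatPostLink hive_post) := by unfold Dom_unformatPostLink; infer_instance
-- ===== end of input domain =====

-- B lowercases the first character of each hyphen-delimited segment in one scan,
-- with a flag instead of A's split / enumerate / rejoin.

-- ===== PORT A =====
def unformatPostLink (hive_post : String) : String :=
  let split : List String := (PySem.Chars.splitOn hive_post.toList "-".toList).map String.ofList
  (PySem.List.enumerate split).foldl
    (fun acc iv =>
      let acc2 := acc ++ PySem.Str.lower (PySem.Str.slice iv.2 none (some 1))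
                      ++ PySem.Str.slice iv.2 (some 1) none
      if iv.1 + 1 < (split.length : Int) then acc2 ++ "-" else acc2)
    ""

-- ===== PORT B =====
def unformatPostLink_alt (hive_post : String) : String :=
  let st := hive_post.toList.foldl
    (fun (st : List Char × Bool) c =>
      (st.1 ++ [if st.2 then PySem.Chars.lowerChar c else c], c == '-'))
    ([], true)
  String.ofList st.1

-- ===== PRECONDITION & SPEC =====
def Spec_unformatPostLink (hive_post : String) (out : String) : Prop := out = unformatPostLink_alt hive_post
instance (hive_post : String) (out : String) : Decidable (Spec_unformatPostLink hive_post out) := by unfold Spec_unformatPostLink; infer_instance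

-- ===== CLAIM (what is proved, stated in full; the proofs are below) =====
def Claim_equal_unformatPostLink : Prop := ∀ (hive_post : String), Dom_unformatPostLink hive_post → Spec_unformatPostLink hive_post (unformatPostLink hive_post)

-- ===== LEMMAS AND PROOFS =====

/-- Proof-side recursive version of splitting on '-'. -/
def spl : List Char → List (List Char)
  | [] => [[]]
  | c :: r =>
    if c = '-' then [] :: spl r
    else
      match spl r with
      | [] => [[c]]          -- unreachable
      | s :: ss => (c :: s) :: ss

lemma spl_ne_nil (l : List Char) : spl l ≠ [] := by
  cases l with
  | nil => simp [spl]
  | cons c r =>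
    simp only [spl]
    split
    · simp
    · split <;> simp

/-- prepend onto the first segment -/
def consFirst (x : List Char) : List (List Char) → List (List Char)
  | [] => [x]
  | s :: ss => (x ++ s) :: ss

lemma consFirst_consFirst (a b : List Char) (ss : List (List Char)) :
    consFirst a (consFirst b ss) = consFirst (a ++ b) ss := by
  cases ss <;> simp [consFirst]

lemma go_spec : ∀ (fuel : Nat) (l cur : List Char) (acc : List (List Char)),
    l.length ≤ fuel →
    PySem.Chars.splitOn.go ['-'] fuel l cur acc = acc.reverse ++ consFirst cur.reverse (spl l) := by
  intro fuel
  induction fuel with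
  | zero =>
    intro l cur acc h
    have : l = [] := by cases l <;> simp_all
    subst this
    simp [PySem.Chars.splitOn.go, spl, consFirst]
  | succ n ih =>
    intro l cur acc h
    cases l with
    | nil => simp [PySem.Chars.splitOn.go, spl, consFirst]
    | cons c rest =>
      rw [PySem.Chars.splitOn.go]
      by_cases hc : c = '-'
      · subst hc
        have hpre : List.isPrefixOf ['-'] ('-' :: rest) = true := by
          simp [List.isPrefixOf]
        rw [if_pos hpre]
        simp only [List.length_cons] at h
        simp only [List.length_cons, List.length_nil, List.drop_succ_cons, List.drop_zero]
        rw [ih rest [] ((cur.reverse) :: acc) (by omega)]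
        simp [spl]
        cases h' : spl rest with
        | nil => exact absurd h' (spl_ne_nil rest)
        | cons s ss => simp [consFirst]
      · have hpre : List.isPrefixOf ['-'] (c :: rest) = false := by
          simp [List.isPrefixOf]
          exact fun h => absurd h.symm hc
        rw [if_neg (by simp [hpre])]
        simp only [List.length_cons] at h
        rw [ih rest (c :: cur) acc (by omega)]
        have : spl (c :: rest) = consFirst [c] (spl rest) := by
          simp only [spl, if_neg hc]
          cases h' : spl rest with
          | nil => exact absurd h' (spl_ne_nil rest)
          | cons s ss => simp [consFirst]
        rw [this, consFirst_consFirst]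
        simp

lemma splitOn_eq_spl (l : List Char) : PySem.Chars.splitOn l ['-'] = spl l := by
  rw [PySem.Chars.splitOn, go_spec (l.length + 1) l [] [] (by omega)]
  simp only [List.reverse_nil, List.nil_append]
  cases h : spl l with
  | nil => exact absurd h (spl_ne_nil l)
  | cons s ss => simp [consFirst]

/-- lowercase the first character of a segment -/
def lowerFirst : List Char → List Char
  | [] => []
  | c :: r => PySem.Chars.lowerChar c :: r

/-- the tail of the join: each later segment preceded by '-', first char lowered -/
def hyLow : List (List Char) → List Char
  | [] => []
  | s :: ss => '-' :: (lowerFirst s ++ hyLow ss)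

/-- the whole join -/
def joinLow : List (List Char) → List Char
  | [] => []
  | s :: ss => lowerFirst s ++ hyLow ss

/-- B's scan, in recursive form. -/
def scan : Bool → List Char → List Char
  | _, [] => []
  | b, c :: r => (if b then PySem.Chars.lowerChar c else c) :: scan (c == '-') r

lemma foldB (l : List Char) : ∀ (out : List Char) (b : Bool),
    (l.foldl (fun (st : List Char × Bool) c =>
      (st.1 ++ [if st.2 then PySem.Chars.lowerChar c else c], c == '-')) (out, b)).1
      = out ++ scan b l := by
  induction l with
  | nil => intro out b; simp [scan]
  | cons c r ih =>
    intro out b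
    simp only [List.foldl_cons, scan]
    rw [ih]
    simp

lemma lowerChar_hyphen : PySem.Chars.lowerChar '-' = '-' := by decide

/-- main scan/split correspondence -/
lemma scan_eq : ∀ (l : List Char) (b : Bool),
    scan b l = (match spl l with
                | [] => []
                | s :: ss => (if b then lowerFirst s else s) ++ hyLow ss) := by
  intro l
  induction l with
  | nil => intro b; cases b <;> simp [scan, spl, lowerFirst, hyLow]
  | cons c r ih =>
    intro b
    by_cases hc : c = '-'
    · subst hc
      have h1 : scan true r = (match spl r with
                | [] => []
                | s :: ss => lowerFirst s ++ hyLow ss) := by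
        rw [ih true]; cases spl r <;> simp
      simp only [scan, spl, reduceIte]
      cases h' : spl r with
      | nil => exact absurd h' (spl_ne_nil r)
      | cons s ss =>
        rw [h'] at h1
        simp only [h'] at *
        cases b <;> simp [lowerChar_hyphen, h1, hyLow, lowerFirst]
    · have h1 : scan false r = (match spl r with
                | [] => []
                | s :: ss => s ++ hyLow ss) := by
        rw [ih false]; cases spl r <;> simp
      have hbe : (c == '-') = false := by simp [hc]
      simp only [scan, hbe, spl, if_neg hc]
      cases h' : spl r with
      | nil => exact absurd h' (spl_ne_nil r)
      | cons s ss =>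
        rw [h'] at h1
        cases b <;> simp [h1, lowerFirst]

/-- characterize B -/
lemma alt_toList (s : String) : (unformatPostLink_alt s).toList = joinLow (spl s.toList) := by
  unfold unformatPostLink_alt
  simp only
  have : ((s.toList.foldl (fun (st : List Char × Bool) c =>
      (st.1 ++ [if st.2 then PySem.Chars.lowerChar c else c], c == '-')) ([], true))).1
      = scan true s.toList := by
    rw [foldB]; simp
  rw [this, scan_eq]
  cases h' : spl s.toList with
  | nil => exact absurd h' (spl_ne_nil s.toList)
  | cons s1 ss => simp [joinLow]

/-- one segment, as A computes it, on the char level -/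
lemma lf_chars (v : List Char) :
    PySem.Chars.lower (PySem.List.slice v none (some 1)) ++ PySem.List.slice v (some 1) none
      = lowerFirst v := by
  rw [PySem.List.slice_to _ (by norm_num), PySem.List.slice_from _ (by norm_num)]
  cases v with
  | nil => simp [lowerFirst, PySem.Chars.lower]
  | cons c r => simp [lowerFirst, PySem.Chars.lower]

/-- A's loop over the enumerated segments -/
lemma foldA (segs : List String) : ∀ (i : Int) (n : Int) (acc : String),
    i + segs.length = n →
    (PySem.List.enumerate segs i).foldl
      (fun acc iv =>
        if iv.1 + 1 < n then
          acc ++ PySem.Str.lower (PySem.Str.slice iv.2 none (some 1)) ++ PySem.Str.slice iv.2 (some 1) ++ "-"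
        else acc ++ PySem.Str.lower (PySem.Str.slice iv.2 none (some 1)) ++ PySem.Str.slice iv.2 (some 1)) acc
      = acc ++ String.ofList (joinLow (segs.map String.toList)) := by
  induction segs with
  | nil =>
    intro i n acc h
    apply String.ext
    simp [PySem.List.enumerate_nil, joinLow]
  | cons v rest ih =>
    intro i n acc h
    rw [PySem.List.enumerate_cons, List.foldl_cons]
    simp only
    cases rest with
    | nil =>
      have hlt : ¬ (i + 1 < n) := by simp at h; omega
      rw [if_neg hlt, PySem.List.enumerate_nil, List.foldl_nil]
      apply String.ext
      simp [joinLow, hyLow, lf_chars]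
    | cons w ws =>
      have hlt : i + 1 < n := by simp at h; omega
      rw [if_pos hlt]
      rw [ih (i + 1) n _ (by simp at h ⊢; omega)]
      apply String.ext
      simp [joinLow, hyLow, lf_chars]

-- ===== VERDICT (by name: the statement is the Claim_ definition above) =====
theorem unformatPostLink_spec : Claim_equal_unformatPostLink := by
  intro s _
  unfold Spec_unformatPostLink unformatPostLink
  simp only
  have hsep : "-".toList = ['-'] := by decide
  rw [hsep, splitOn_eq_spl]
  rw [foldA ((spl s.toList).map String.ofList) 0
      (((spl s.toList).map String.ofList).length : Int) "" (by simp)]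
  apply String.ext
  rw [alt_toList]
  simp only [String.toList_append]
  have hmap : List.map (String.toList ∘ String.ofList) (spl s.toList) = spl s.toList := by
    simp [Function.comp_def]
  rw [List.map_map, hmap]
  simp
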